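-- pv_equiv track=rewrite | github.com/Loquaxious/COSC262 | Quiz2/q6_dumbo_func.py | dumbo_func
-- ===== SOURCE A (Python) =====
-- def dumbo_func(data, start_index=0):
--     """Takes a list of numbers and does weird stuff with it"""
--     if start_index == len(data):
--         return 0
--     else:
--         if (data[start_index] // 100) % 3 != 0:
--             return 1 + dumbo_func(data, start_index + 1)
--         else:
--             return dumbo_func(data, start_index + 1)
-- ===== SOURCE B (Python) =====
-- def dumbo_func(data, start_index=0):
--     """Takes a list of numbers and does weird stuff with it"""
--     return sum(1 for i in range(start_index, len(data))
--                if (data[i] // 100) % 3 != 0)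
-- ===== Notes on version B (the rewrite author's own statement) =====
-- stated objective: idiomatic
-- what changed: Replaces the index-by-index recursion with a single generator-sum over range(start_index, len(data)), counting elements whose (x//100)%3 is nonzero.
import Mathlib
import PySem

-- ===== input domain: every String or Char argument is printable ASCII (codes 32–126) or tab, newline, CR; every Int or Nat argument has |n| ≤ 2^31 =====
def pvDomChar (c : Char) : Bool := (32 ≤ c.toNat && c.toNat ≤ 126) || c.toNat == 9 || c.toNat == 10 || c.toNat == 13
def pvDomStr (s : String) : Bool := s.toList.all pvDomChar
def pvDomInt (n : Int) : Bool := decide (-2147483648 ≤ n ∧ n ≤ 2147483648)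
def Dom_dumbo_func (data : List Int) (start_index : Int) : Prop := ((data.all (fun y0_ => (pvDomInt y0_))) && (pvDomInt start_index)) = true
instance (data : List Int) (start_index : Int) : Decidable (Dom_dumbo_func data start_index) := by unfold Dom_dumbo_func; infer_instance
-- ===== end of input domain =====

-- B replaces A's index recursion by a single sum over range(start_index, len(data)) (idiomatic; same cost).


-- ===== PORT A =====
def dumbo_func (data : List Int) (start_index : Int) : Int :=
  if start_index = (data.length : Int) then 0
  else
    match h : PySem.List.pyGet? data start_index with
    | none => 0  -- data[start_index] raises IndexError in Python; excluded by Pre_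
    | some x =>
      if PySem.Int.mod (PySem.Int.floordiv x 100) 3 ≠ 0 then
        1 + dumbo_func data (start_index + 1)
      else
        dumbo_func data (start_index + 1)
termination_by ((data.length : Int) - start_index).toNat
decreasing_by
  all_goals
    have hin : PySem.Raise.InRange data.length start_index := by
      by_contra hc
      rw [(PySem.List.pyGet?_eq_none_iff data start_index).mpr hc] at h
      simp at h
    unfold PySem.Raise.InRange at hin
    omega

-- ===== PORT B =====
def dumbo_func_alt (data : List Int) (start_index : Int) : Int :=
  ((PySem.List.pyRange start_index (data.length : Int) 1).map
    (fun i => if PySem.Int.mod (PySem.Int.floordiv (PySem.List.pyGetD data i 0) 100) 3 ≠ 0 then (1 : Int) else 0)).sum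

-- ===== PRECONDITION & SPEC =====
-- Pre_ excludes exactly the inputs where A raises IndexError (start_index out of range, ≠ len).
def Pre_dumbo_func (data : List Int) (start_index : Int) : Prop :=
  -(data.length : Int) ≤ start_index ∧ start_index ≤ (data.length : Int)
instance (data : List Int) (start_index : Int) : Decidable (Pre_dumbo_func data start_index) := by unfold Pre_dumbo_func; infer_instance
def pvWitness_dumbo_func : List Int × Int := ([150, 310, 42], 0)

def Spec_dumbo_func (data : List Int) (start_index : Int) (out : Int) : Prop := out = dumbo_func_alt data start_index
instance (data : List Int) (start_index : Int) (out : Int) : Decidable (Spec_dumbo_func data start_index out) := by unfold Spec_dumbo_func; infer_instance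

-- ===== CLAIM (what is proved, stated in full; the proofs are below) =====
def Claim_equal_dumbo_func : Prop := ∀ (data : List Int) (start_index : Int), Dom_dumbo_func data start_index → Pre_dumbo_func data start_index → Spec_dumbo_func data start_index (dumbo_func data start_index)

-- ===== LEMMAS AND PROOFS =====

lemma dumbo_main (data : List Int) (k : Nat) :
    ∀ start_index : Int, -(data.length : Int) ≤ start_index → start_index ≤ (data.length : Int) →
    ((data.length : Int) - start_index).toNat = k →
    dumbo_func data start_index = dumbo_func_alt data start_index := by
  induction k with
  | zero =>
    intro si h1 h2 hk
    have hsi : si = (data.length : Int) := by omega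
    rw [dumbo_func, dumbo_func_alt, if_pos hsi, hsi,
      PySem.List.pyRange_one_eq_nil (by omega)]
    rfl
  | succ k ih =>
    intro si h1 h2 hk
    have hlt : si < (data.length : Int) := by omega
    have hin : PySem.Raise.InRange data.length si := by
      unfold PySem.Raise.InRange; omega
    obtain ⟨x, hx⟩ : ∃ x, PySem.List.pyGet? data si = some x := by
      cases hget : PySem.List.pyGet? data si with
      | none => exact absurd ((PySem.List.pyGet?_eq_none_iff data si).mp hget) (not_not.mpr hin)
      | some y => exact ⟨y, rfl⟩
    have hgetD : PySem.List.pyGetD data si 0 = x := by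
      simp [PySem.List.pyGetD, hx]
    have hrec : dumbo_func data (si + 1) = dumbo_func_alt data (si + 1) :=
      ih (si + 1) (by omega) (by omega) (by omega)
    rw [dumbo_func, if_neg (by omega), hx]
    rw [dumbo_func_alt, PySem.List.pyRange_one_cons hlt, List.map_cons, List.sum_cons, hgetD]
    by_cases hc : PySem.Int.mod (PySem.Int.floordiv x 100) 3 ≠ 0
    · simp only [if_pos hc, hrec, dumbo_func_alt]
    · simp only [if_neg hc, hrec, dumbo_func_alt, zero_add]

-- ===== VERDICT (by name: the statement is the Claim_ definition above) =====
theorem dumbo_func_spec : Claim_equal_dumbo_func := by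
  intro data si _ hpre
  exact dumbo_main data (((data.length : Int) - si).toNat) si hpre.1 hpre.2 rfl
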